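-- pv_equiv track=rewrite | github.com/jbrooksuk/BlueberryTrios | scripts/classify_standard_difficulty.py | apply_min_max
-- ===== SOURCE A (Python) =====
-- UNDECIDED = 0
--
-- EMPTY = 1
--
-- BERRY = 2
--
-- def counts(cells, members):
--     b = e = u = 0
--     for idx in members:
--         s = cells[idx]
--         if s == BERRY:
--             b += 1
--         elif s == EMPTY:
--             e += 1
--         else:
--             u += 1
--     return b, e, u
--
-- def apply_min_max(cells, groups):
--     """One pass of Tier 2 min/max. Returns True if anything changed.
--     Matches PuzzleSolver.findMinMaxMoves / propagateToContradiction."""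
--     changed = False
--     for _pkind, _pid, _pclue, pmembers in groups:
--         for _skind, _sid, sclue, smembers in groups:
--             if pmembers is smembers:
--                 continue
--             intersection = pmembers & smembers
--             if not intersection:
--                 continue
--             ib, _ie, iu = counts(cells, intersection)
--             if iu == 0:
--                 continue
--             secondary_only = smembers - pmembers
--             sob, _soe, sou = counts(cells, secondary_only)
--
--             max_from_int = min(ib + iu, sclue - sob)
--             min_from_int = max(ib, sclue - sob - sou)
--
--             if min_from_int > ib:
--                 needed = min_from_int - ib
--                 if needed == iu:
--                     for idx in intersection:
--                         if cells[idx] == UNDECIDED: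
--                             cells[idx] = BERRY
--                             changed = True
--             if max_from_int == ib:
--                 for idx in intersection:
--                     if cells[idx] == UNDECIDED:
--                         cells[idx] = EMPTY
--                         changed = True
--     return changed
-- ===== SOURCE B (Python) =====
-- UNDECIDED = 0
--
-- EMPTY = 1
--
-- BERRY = 2
--
-- def apply_min_max(cells, groups):
--     """One pass of Tier 2 min/max. Returns True if anything changed.
--     Mutates `cells` in place exactly like the original. Different data
--     structure: per-group running (berries, undecided) tallies are built once
--     and kept current across every cell write, so the secondary-only set and
--     its counting scan disappear: sob = tally_b - ib, sou = tally_u - iu.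
--     Tally reads use .get with UNDECIDED as default (a missing cell counts as
--     undecided); every cell the original actually reads is present anyway."""
--     changed = False
--     member_lists = [g[3] for g in groups]
--     tall = []
--     for members in member_lists:
--         b = u = 0
--         for idx in members:
--             s = cells.get(idx, UNDECIDED)
--             if s == BERRY:
--                 b += 1
--             elif s != EMPTY:
--                 u += 1
--         tall.append((b, u))
--
--     def write(idx, v):
--         nonlocal changed
--         cells[idx] = v
--         changed = True
--         for gi, members in enumerate(member_lists):
--             if idx in members:
--                 b, u = tall[gi]
--                 tall[gi] = (b + 1 if v == BERRY else b, u - 1)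
--
--     for pi, (_pk, _pid, _pc, pmembers) in enumerate(groups):
--         for si, (_sk, _sid, sclue, smembers) in enumerate(groups):
--             if pi == si:
--                 continue
--             inter = []
--             ib = iu = 0
--             for idx in smembers:
--                 if idx in pmembers:
--                     inter.append(idx)
--                     s = cells.get(idx, UNDECIDED)
--                     if s == BERRY:
--                         ib += 1
--                     elif s != EMPTY:
--                         iu += 1
--             if iu == 0:
--                 continue
--             tb, tu = tall[si]
--             sob = tb - ib
--             sou = tu - iu
--             max_from_int = min(ib + iu, sclue - sob)
--             min_from_int = max(ib, sclue - sob - sou)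
--             if min_from_int > ib and min_from_int - ib == iu:
--                 for idx in inter:
--                     if cells.get(idx, UNDECIDED) == UNDECIDED:
--                         write(idx, BERRY)
--             if max_from_int == ib:
--                 for idx in inter:
--                     if cells.get(idx, UNDECIDED) == UNDECIDED:
--                         write(idx, EMPTY)
--     return changed
-- ===== Notes on version B (the rewrite author's own statement) =====
-- stated objective: alternative
-- what changed: B builds per-group running (berries, undecided) tallies once and keeps them current on every cell write, so the per-pair secondary-only set and its counting scan disappear: sob and sou are derived arithmetically as tally_b - ib and tally_u - iu, and the intersection list with its ib/iu counts is produced by one scan of the secondary group's members.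
-- outside the precondition, e.g. on apply_min_max({0: 0}, [(0, 0, 1, {0, 1}), (0, 1, 1, {0, 1})]): A raises KeyError, B returns False
import Mathlib
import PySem

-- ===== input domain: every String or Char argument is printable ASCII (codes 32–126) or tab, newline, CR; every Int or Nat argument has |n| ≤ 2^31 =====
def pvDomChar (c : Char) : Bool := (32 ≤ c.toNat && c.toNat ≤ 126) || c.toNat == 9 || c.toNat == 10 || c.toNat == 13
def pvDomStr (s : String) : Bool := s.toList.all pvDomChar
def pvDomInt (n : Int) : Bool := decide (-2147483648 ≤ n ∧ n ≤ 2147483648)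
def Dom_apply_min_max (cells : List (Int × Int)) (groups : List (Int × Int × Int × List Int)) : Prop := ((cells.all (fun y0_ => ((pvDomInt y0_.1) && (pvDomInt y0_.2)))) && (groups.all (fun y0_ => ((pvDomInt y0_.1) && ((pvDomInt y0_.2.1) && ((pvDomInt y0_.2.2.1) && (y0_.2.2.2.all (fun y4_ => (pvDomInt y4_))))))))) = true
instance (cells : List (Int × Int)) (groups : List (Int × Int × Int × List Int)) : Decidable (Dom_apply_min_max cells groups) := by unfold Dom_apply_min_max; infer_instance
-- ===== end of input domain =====

-- B maintains per-group running (berries, undecided) tallies, updated on every cell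
-- write, so A's per-pair secondary-only set and its counting scan disappear
-- (objective: alternative, not claimed faster). Both Pythons mutate `cells` in place
-- identically; the equivalence proved here is about the returned Bool (the Lean
-- ports thread the dict as explicit state).

-- ===== PORT A =====
-- `cells[idx]` on a missing key raises KeyError; Pre_ excludes those inputs, the
-- read is ported as getD with an arbitrary default (0), exact wherever Pre_ holds.
def counts (cells : PySem.Dict Int Int) (members : List Int) : Int × Int × Int :=
  members.foldl
    (fun acc idx =>
      let s := cells.getD idx 0
      if s = 2 then (acc.1 + 1, acc.2.1, acc.2.2)
      else if s = 1 then (acc.1, acc.2.1 + 1, acc.2.2)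
      else (acc.1, acc.2.1, acc.2.2 + 1))
    (0, 0, 0)

-- `for idx in intersection: if cells[idx] == UNDECIDED: cells[idx] = v; changed = True`
def ammMark (l : List Int) (v : Int) (st : PySem.Dict Int Int × Bool) : PySem.Dict Int Int × Bool :=
  l.foldl (fun st idx => if st.1.getD idx 0 = 0 then (st.1.insert idx v, true) else st) st

-- the body of A's inner loop; `pmembers is smembers` is identity of the two set
-- objects, i.e. (for inputs without aliasing between entries) the same position
-- in `groups`, ported as equality of the enumerate indices.
def ammPair (st : PySem.Dict Int Int × Bool) (pg sg : Int × Int × Int × Int × List Int) :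
    PySem.Dict Int Int × Bool :=
  if pg.1 = sg.1 then st
  else
    let pmembers := pg.2.2.2.2
    let sclue := sg.2.2.2.1
    let smembers := sg.2.2.2.2
    let inter := PySem.Set.inter pmembers smembers
    if inter = [] then st
    else
      let ci := counts st.1 inter
      if ci.2.2 = 0 then st
      else
        let so := PySem.Set.diff smembers pmembers
        let cso := counts st.1 so
        let maxFromInt := min (ci.1 + ci.2.2) (sclue - cso.1)
        let minFromInt := max ci.1 (sclue - cso.1 - cso.2.2)
        let st1 := if minFromInt > ci.1 then
                     (if minFromInt - ci.1 = ci.2.2 then ammMark inter 2 st else st)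
                   else st
        if maxFromInt = ci.1 then ammMark inter 1 st1 else st1

def apply_min_max (cells : List (Int × Int)) (groups : List (Int × Int × Int × List Int)) : Bool :=
  ((PySem.List.enumerate groups).foldl
    (fun st pg => (PySem.List.enumerate groups).foldl (fun st sg => ammPair st pg sg) st)
    (PySem.Dict.mk cells, false)).2

-- ===== PORT B =====
-- initial tally of one group: (berries, undecided); `cells.get(idx, UNDECIDED)` = getD 0
def bTally (cells : PySem.Dict Int Int) (members : List Int) : Int × Int :=
  members.foldl
    (fun acc idx =>
      let s := cells.getD idx 0
      if s = 2 then (acc.1 + 1, acc.2)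
      else if s ≠ 1 then (acc.1, acc.2 + 1)
      else acc)
    (0, 0)

-- `write(idx, v)`: set the cell, flag changed, update the tally of every group containing idx
def bWrite (ml : List (List Int)) (idx v : Int)
    (st : PySem.Dict Int Int × Bool × List (Int × Int)) :
    PySem.Dict Int Int × Bool × List (Int × Int) :=
  (st.1.insert idx v, true,
   (ml.zip st.2.2).map (fun mt =>
     if idx ∈ mt.1 then ((if v = 2 then mt.2.1 + 1 else mt.2.1), mt.2.2 - 1) else mt.2))

-- one scan of smembers: the intersection list together with its (ib, iu)
def bScan (cells : PySem.Dict Int Int) (p s : List Int) : List Int × Int × Int :=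
  s.foldl
    (fun acc idx =>
      if idx ∈ p then
        let v := cells.getD idx 0
        (acc.1 ++ [idx],
         (if v = 2 then acc.2.1 + 1 else acc.2.1),
         (if v ≠ 2 ∧ v ≠ 1 then acc.2.2 + 1 else acc.2.2))
      else acc)
    ([], 0, 0)

-- `for idx in inter: if cells.get(idx, UNDECIDED) == UNDECIDED: write(idx, v)`
def bMark (ml : List (List Int)) (inter : List Int) (v : Int)
    (st : PySem.Dict Int Int × Bool × List (Int × Int)) :
    PySem.Dict Int Int × Bool × List (Int × Int) :=
  inter.foldl (fun st idx => if st.1.getD idx 0 = 0 then bWrite ml idx v st else st) st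

-- the body of B's inner loop; `tall[si]` is an always-in-range index, ported as
-- pyGetD with an unreachable default.
def bPair (ml : List (List Int)) (st : PySem.Dict Int Int × Bool × List (Int × Int))
    (pg sg : Int × Int × Int × Int × List Int) :
    PySem.Dict Int Int × Bool × List (Int × Int) :=
  if pg.1 = sg.1 then st
  else
    let pmembers := pg.2.2.2.2
    let sclue := sg.2.2.2.1
    let smembers := sg.2.2.2.2
    let t := bScan st.1 pmembers smembers
    if t.2.2 = 0 then st
    else
      let tv := PySem.List.pyGetD st.2.2 sg.1 (0, 0)
      let sob := tv.1 - t.2.1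
      let sou := tv.2 - t.2.2
      let maxFromInt := min (t.2.1 + t.2.2) (sclue - sob)
      let minFromInt := max t.2.1 (sclue - sob - sou)
      let st1 := if minFromInt > t.2.1 ∧ minFromInt - t.2.1 = t.2.2
                 then bMark ml t.1 2 st else st
      if maxFromInt = t.2.1 then bMark ml t.1 1 st1 else st1

def apply_min_max_alt (cells : List (Int × Int)) (groups : List (Int × Int × Int × List Int)) : Bool :=
  let ml := groups.map (fun g => g.2.2.2)
  let d0 := PySem.Dict.mk cells
  let tall0 := ml.map (fun m => bTally d0 m)
  ((PySem.List.enumerate groups).foldl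
    (fun st pg => (PySem.List.enumerate groups).foldl (fun st sg => bPair ml st pg sg) st)
    (d0, false, tall0)).2.1

-- ===== PRECONDITION & SPEC =====
-- Pre_ excludes (a) inputs where A's `cells[idx]` raises KeyError: A reads the whole
-- intersection of every distinct pair of groups, and the secondary-only cells of a pair
-- whenever its intersection holds a cell that is not decided (value 1 or 2) initially
-- (a conservative over-approximation of "undecided when the pair is visited": cells only
-- ever change 0 -> 1/2); and (b) assoc/element lists that do not represent a Python
-- dict/set at all (duplicate dict keys, duplicate set elements) — representation
-- invariants of the type convention, not a narrowing of A's domain.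
def Pre_apply_min_max (cells : List (Int × Int)) (groups : List (Int × Int × Int × List Int)) : Prop :=
  (cells.map Prod.fst).Nodup ∧
  (∀ g ∈ groups, g.2.2.2.Nodup) ∧
  ∀ pg ∈ PySem.List.enumerate groups, ∀ sg ∈ PySem.List.enumerate groups, pg.1 ≠ sg.1 →
    (∀ x ∈ PySem.Set.inter pg.2.2.2.2 sg.2.2.2.2, x ∈ cells.map Prod.fst) ∧
    ((∃ x ∈ PySem.Set.inter pg.2.2.2.2 sg.2.2.2.2,
        ¬((PySem.Dict.mk cells).getD x 0 = 1 ∨ (PySem.Dict.mk cells).getD x 0 = 2)) →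
      ∀ x ∈ PySem.Set.diff sg.2.2.2.2 pg.2.2.2.2, x ∈ cells.map Prod.fst)
instance (cells : List (Int × Int)) (groups : List (Int × Int × Int × List Int)) : Decidable (Pre_apply_min_max cells groups) := by unfold Pre_apply_min_max; infer_instance

def pvWitness_apply_min_max : (List (Int × Int)) × (List (Int × Int × Int × List Int)) :=
  ([(0, 0), (1, 2)], [(0, 0, 1, [0, 1]), (0, 1, 1, [0])])

def Spec_apply_min_max (cells : List (Int × Int)) (groups : List (Int × Int × Int × List Int)) (out : Bool) : Prop := out = apply_min_max_alt cells groups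
instance (cells : List (Int × Int)) (groups : List (Int × Int × Int × List Int)) (out : Bool) : Decidable (Spec_apply_min_max cells groups out) := by unfold Spec_apply_min_max; infer_instance

-- ===== CLAIM (what is proved, stated in full; the proofs are below) =====
def Claim_equal_apply_min_max : Prop := ∀ (cells : List (Int × Int)) (groups : List (Int × Int × Int × List Int)), Dom_apply_min_max cells groups → Pre_apply_min_max cells groups → Spec_apply_min_max cells groups (apply_min_max cells groups)

-- ===== LEMMAS AND PROOFS =====

-- counting abbreviations used throughout the proofs
def cntB (d : PySem.Dict Int Int) (m : List Int) : Int :=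
  (m.countP (fun x => d.getD x 0 == 2) : Int)
def cntU (d : PySem.Dict Int Int) (m : List Int) : Int :=
  (m.countP (fun x => !(d.getD x 0 == 2) && !(d.getD x 0 == 1)) : Int)

-- canonical value of B's tally list, as a function of the current dict
def pvCanon (ml : List (List Int)) (d : PySem.Dict Int Int) : List (Int × Int) :=
  ml.map (fun m => (cntB d m, cntU d m))

-- B's state corresponding to A's state
def pvPack (ml : List (List Int)) (st : PySem.Dict Int Int × Bool) :
    PySem.Dict Int Int × Bool × List (Int × Int) :=
  (st.1, st.2, pvCanon ml st.1)

theorem pvFoldlSim {α γ δ : Type} {R : γ → δ → Prop} {f : γ → α → γ} {g : δ → α → δ} :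
    ∀ (l : List α) (stA : γ) (stB : δ), R stA stB →
      (∀ stA stB a, a ∈ l → R stA stB → R (f stA a) (g stB a)) →
      R (l.foldl f stA) (l.foldl g stB) := by
  intro l
  induction l with
  | nil => intro stA stB h _; exact h
  | cons x t ih =>
    intro stA stB h hstep
    exact ih (f stA x) (g stB x) (hstep stA stB x (by simp) h)
      (fun sA sB a ha hR => hstep sA sB a (by simp [ha]) hR)

def countsStep (d : PySem.Dict Int Int) (acc : Int × Int × Int) (idx : Int) : Int × Int × Int :=
  let s := d.getD idx 0
  if s = 2 then (acc.1 + 1, acc.2.1, acc.2.2)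
  else if s = 1 then (acc.1, acc.2.1 + 1, acc.2.2)
  else (acc.1, acc.2.1, acc.2.2 + 1)

theorem counts_go (d : PySem.Dict Int Int) :
    ∀ (l : List Int) (a b c : Int),
      l.foldl (countsStep d) (a, b, c) =
        (a + (l.countP (fun x => d.getD x 0 == 2) : Int),
         b + (l.countP (fun x => d.getD x 0 == 1) : Int),
         c + (l.countP (fun x => !(d.getD x 0 == 2) && !(d.getD x 0 == 1)) : Int)) := by
  intro l
  induction l with
  | nil => intro a b c; simp
  | cons x t ih =>
    intro a b c
    simp only [List.foldl_cons, List.countP_cons, countsStep]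
    by_cases h2 : d.getD x 0 = 2
    · simp [h2, ih]; ring
    · by_cases h1 : d.getD x 0 = 1
      · simp [h1, ih]; ring
      · simp [h1, h2, ih]; ring

theorem counts_eq (d : PySem.Dict Int Int) (l : List Int) :
    counts d l =
      ((l.countP (fun x => d.getD x 0 == 2) : Int),
       (l.countP (fun x => d.getD x 0 == 1) : Int),
       (l.countP (fun x => !(d.getD x 0 == 2) && !(d.getD x 0 == 1)) : Int)) := by
  have h := counts_go d l 0 0 0
  simpa [counts, countsStep] using h

def bTallyStep (d : PySem.Dict Int Int) (acc : Int × Int) (idx : Int) : Int × Int :=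
  let s := d.getD idx 0
  if s = 2 then (acc.1 + 1, acc.2)
  else if s ≠ 1 then (acc.1, acc.2 + 1)
  else acc

theorem bTally_eq (d : PySem.Dict Int Int) :
    ∀ (l : List Int) (a b : Int),
      l.foldl (bTallyStep d) (a, b) = (a + cntB d l, b + cntU d l) := by
  intro l
  induction l with
  | nil => intro a b; simp [cntB, cntU]
  | cons x t ih =>
    intro a b
    rw [List.foldl_cons]
    by_cases h2 : d.getD x 0 = 2
    · rw [show bTallyStep d (a, b) x = (a + 1, b) from by simp [bTallyStep, h2], ih]
      simp only [cntB, cntU, List.countP_cons, h2, Prod.ext_iff]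
      exact ⟨by simp; omega, by simp⟩
    · by_cases h1 : d.getD x 0 = 1
      · rw [show bTallyStep d (a, b) x = (a, b) from by simp [bTallyStep, h1], ih]
        simp only [cntB, cntU, List.countP_cons, h1, Prod.ext_iff]
        refine ⟨?_, ?_⟩ <;> rfl
      · rw [show bTallyStep d (a, b) x = (a, b + 1) from by simp [bTallyStep, h2, h1], ih]
        simp only [cntB, cntU, List.countP_cons, Prod.ext_iff]
        exact ⟨by simp [h2], by simp [h2, h1]; omega⟩

theorem pvCanon_init (d : PySem.Dict Int Int) (ml : List (List Int)) :
    ml.map (fun m => bTally d m) = pvCanon ml d := by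
  unfold pvCanon
  apply List.map_congr_left
  intro m _
  have e : bTally d m = m.foldl (bTallyStep d) (0, 0) := rfl
  rw [e, bTally_eq]
  simp

theorem countP_filter_swap (p s : List Int) (hp : p.Nodup) (hs : s.Nodup) (q : Int → Bool) :
    (p.filter (fun x => s.contains x)).countP q
      = (s.filter (fun x => p.contains x)).countP q := by
  have hperm : (p.filter (fun x => s.contains x)).Perm (s.filter (fun x => p.contains x)) := by
    rw [List.perm_ext_iff_of_nodup (hp.filter _) (hs.filter _)]
    intro a
    simp only [List.mem_filter, List.contains_iff_mem]
    exact and_comm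
  exact hperm.countP_eq _

theorem enum_snd_mem {xs : List (Int × Int × Int × List Int)} {pg : Int × Int × Int × Int × List Int}
    (h : pg ∈ PySem.List.enumerate xs) : pg.2 ∈ xs := by
  have h2 := List.mem_map_of_mem (f := fun q : Int × Int × Int × Int × List Int => q.2) h
  rwa [PySem.List.map_snd_enumerate] at h2

theorem ammMark_cons (x : Int) (t : List Int) (v : Int) (st : PySem.Dict Int Int × Bool) :
    ammMark (x :: t) v st
      = ammMark t v (if st.1.getD x 0 = 0 then (st.1.insert x v, true) else st) := rfl

theorem ammMark_keys (v : Int) :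
    ∀ (l : List Int) (d : PySem.Dict Int Int) (ch : Bool),
      (∀ x ∈ l, d.contains x = true) → (ammMark l v (d, ch)).1.keys = d.keys := by
  intro l
  induction l with
  | nil => intro d ch _; rfl
  | cons x t ih =>
    intro d ch hc
    rw [ammMark_cons]
    by_cases h0 : d.getD x 0 = 0
    · rw [if_pos h0]
      have hkeys : (d.insert x v).keys = d.keys :=
        PySem.Dict.keys_insert_of_contains d v (hc x (by simp))
      have hc' : ∀ y ∈ t, (d.insert x v).contains y = true := by
        intro y hy
        rw [PySem.Dict.contains_insert]
        simp [hc y (by simp [hy])]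
      rw [ih (d.insert x v) true hc', hkeys]
    · rw [if_neg h0]
      exact ih d ch (fun y hy => hc y (by simp [hy]))

theorem ammMark_canon (v : Int) :
    ∀ (l : List Int) (d : PySem.Dict Int Int) (ch : Bool),
      l.Nodup → d.keys.Nodup → (∀ x ∈ l, d.contains x = true) →
      ammMark l v (d, ch) =
        (PySem.Dict.mk (d.items.map (fun q => if q.1 ∈ l ∧ q.2 = 0 then (q.1, v) else q)),
         ch || l.any (fun k => d.getD k 0 == 0)) := by
  intro l
  induction l with
  | nil =>
    intro d ch _ _ _
    simp [ammMark]
  | cons x t ih =>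
    intro d ch hnd hk hc
    have hxt : x ∉ t := (List.nodup_cons.mp hnd).1
    have htn : t.Nodup := (List.nodup_cons.mp hnd).2
    rw [ammMark_cons]
    by_cases h0 : d.getD x 0 = 0
    · rw [if_pos h0]
      have hcx : d.contains x = true := hc x (by simp)
      have hk' : (d.insert x v).keys.Nodup := PySem.Dict.nodup_keys_insert d x v hk
      have hc' : ∀ y ∈ t, (d.insert x v).contains y = true := by
        intro y hy; rw [PySem.Dict.contains_insert]; simp [hc y (by simp [hy])]
      rw [ih (d.insert x v) true htn hk' hc']
      have hitems : (d.insert x v).items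
          = d.items.map (fun q => if q.1 == x then (x, v) else q) :=
        PySem.Dict.items_insert_of_contains d v hcx
      simp only [Prod.mk.injEq]
      refine ⟨?_, ?_⟩
      · rw [hitems, List.map_map]
        congr 1
        apply List.map_congr_left
        intro q hq
        by_cases hqx : q.1 = x
        · have hq2 : q.2 = 0 := by
            have h := PySem.Dict.getD_of_mem_items d (k := q.1) (v := q.2)
              (by simpa using hq) hk 0
            rw [hqx, h0] at h; omega
          simp [Function.comp, hqx, hxt, hq2]
        · simp [Function.comp, hqx]
      · simp [h0]
    · rw [if_neg h0]
      rw [ih d ch htn hk (fun y hy => hc y (by simp [hy]))]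
      have hflag : (d.getD x 0 == 0) = false := by simpa using h0
      simp only [Prod.mk.injEq]
      refine ⟨?_, ?_⟩
      · congr 1
        apply List.map_congr_left
        intro q hq
        by_cases hqx : q.1 = x
        · have hq2 : q.2 = d.getD x 0 := by
            have h := PySem.Dict.getD_of_mem_items d (k := q.1) (v := q.2)
              (by simpa using hq) hk 0
            rw [hqx] at h; omega
          have hq2ne : ¬ q.2 = 0 := by omega
          simp [hqx, hxt, hq2ne]
        · simp [hqx]
      · simp [List.any_cons, hflag]

theorem pvAnyCongrMem (l1 l2 : List Int) (h : ∀ x, x ∈ l1 ↔ x ∈ l2) (q : Int → Bool) :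
    l1.any q = l2.any q := by
  rw [Bool.eq_iff_iff, List.any_eq_true, List.any_eq_true]
  constructor <;> rintro ⟨x, hx, hq⟩
  · exact ⟨x, (h x).mp hx, hq⟩
  · exact ⟨x, (h x).mpr hx, hq⟩

-- A's mark over the intersection SET equals the same mark over B's filtered LIST
theorem mark_perm (p s : List Int) (v : Int) (d : PySem.Dict Int Int) (ch : Bool)
    (hp : p.Nodup) (hs : s.Nodup) (hnd : d.keys.Nodup)
    (hc : ∀ x ∈ PySem.Set.inter p s, d.contains x = true) :
    ammMark (PySem.Set.inter p s) v (d, ch)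
      = ammMark (s.filter (fun x => decide (x ∈ p))) v (d, ch) := by
  have hmem : ∀ x, x ∈ PySem.Set.inter p s ↔ x ∈ s.filter (fun x => decide (x ∈ p)) := by
    intro x
    simp only [PySem.Set.mem_inter, List.mem_filter, decide_eq_true_eq]
    exact and_comm
  rw [ammMark_canon v (PySem.Set.inter p s) d ch (hp.filter _) hnd hc,
      ammMark_canon v (s.filter (fun x => decide (x ∈ p))) d ch (hs.filter _) hnd
        (fun x hx => hc x ((hmem x).mpr hx))]
  simp only [Prod.mk.injEq]
  refine ⟨?_, ?_⟩
  · congr 1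
    apply List.map_congr_left
    intro q _
    exact if_congr (and_congr_left' (hmem q.1)) rfl rfl
  · congr 1
    exact pvAnyCongrMem _ _ hmem _

theorem ammPair_keys (st : PySem.Dict Int Int × Bool) (pg sg : Int × Int × Int × Int × List Int)
    (hc : pg.1 ≠ sg.1 → ∀ x ∈ PySem.Set.inter pg.2.2.2.2 sg.2.2.2.2, st.1.contains x = true) :
    (ammPair st pg sg).1.keys = st.1.keys := by
  unfold ammPair
  by_cases hid : pg.1 = sg.1
  · simp [hid]
  · have hmark : ∀ (v : Int) (st' : PySem.Dict Int Int × Bool),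
        st'.1.keys = st.1.keys →
        (ammMark (PySem.Set.inter pg.2.2.2.2 sg.2.2.2.2) v st').1.keys = st.1.keys := by
      intro v st' hk
      obtain ⟨d', ch'⟩ := st'
      rw [ammMark_keys v _ d' ch' ?_]
      · exact hk
      · intro x hx
        have h2 := hc hid x hx
        rw [PySem.Dict.contains_iff_mem_keys] at h2 ⊢
        simp only at hk
        rw [hk]
        exact h2
    simp only [if_neg hid]
    split_ifs with h1 h2 h3 h4 h5
    all_goals first
      | rfl
      | (apply hmark; rfl)
      | (apply hmark; apply hmark; rfl)

theorem pvCountInter (p s : List Int) (hp : p.Nodup) (hs : s.Nodup) (q : Int → Bool) :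
    ((PySem.Set.inter p s).countP q : Int)
      = (s.countP (fun x => decide (x ∈ p) && q x) : Int) := by
  have h1 : PySem.Set.inter p s = p.filter (fun x => s.contains x) := rfl
  rw [h1, countP_filter_swap p s hp hs q, List.countP_filter]
  congr 1
  apply List.countP_congr
  intro x _
  by_cases hx : x ∈ p <;> simp [hx]

theorem pvCountDiff (p s : List Int) (q : Int → Bool) :
    ((PySem.Set.diff s p).countP q : Int)
      = (s.countP (fun x => !decide (x ∈ p) && q x) : Int) := by
  have h1 : PySem.Set.diff s p = s.filter (fun x => !p.contains x) := rfl
  rw [h1, List.countP_filter]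
  congr 1
  apply List.countP_congr
  intro x _
  by_cases hx : x ∈ p <;> simp [hx]

-- splitting a count over s by membership in p
theorem countP_split (p : List Int) (q : Int → Bool) :
    ∀ (s : List Int),
      (s.countP q : Int)
        = (s.countP (fun x => decide (x ∈ p) && q x) : Int)
          + (s.countP (fun x => !decide (x ∈ p) && q x) : Int) := by
  intro s
  induction s with
  | nil => simp
  | cons x t ih =>
    simp only [List.countP_cons]
    by_cases hx : x ∈ p <;> by_cases hq : q x <;> simp [hx, hq, ih] <;> ring

-- how one write changes a count over a duplicate-free member list
theorem cnt_change (q : Int → Bool) (d : PySem.Dict Int Int) (x v : Int) :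
    ∀ (m : List Int), m.Nodup →
      ((m.countP (fun y => q ((d.insert x v).getD y 0))) : Int)
        = (m.countP (fun y => q (d.getD y 0)) : Int)
          + (if x ∈ m then (if q v then 1 else 0) - (if q (d.getD x 0) then 1 else 0) else 0) := by
  intro m
  induction m with
  | nil => simp
  | cons y t ih =>
    intro hnd
    have hyt : y ∉ t := (List.nodup_cons.mp hnd).1
    have htn : t.Nodup := (List.nodup_cons.mp hnd).2
    simp only [List.countP_cons]
    by_cases hyx : y = x
    · subst hyx
      have hget : (d.insert y v).getD y 0 = v := by simp
      have htail : t.countP (fun z => q ((d.insert y v).getD z 0))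
          = t.countP (fun z => q (d.getD z 0)) := by
        apply List.countP_congr
        intro z hz
        have hzy : z ≠ y := fun h => hyt (h ▸ hz)
        rw [PySem.Dict.getD_insert]
        simp [hzy]
      rw [hget, htail]
      simp only [List.mem_cons, true_or, if_true] at *
      by_cases hqv : q v <;> by_cases hqo : q (d.getD y 0) <;>
        simp [hqv, hqo]
    · have hget : (d.insert x v).getD y 0 = d.getD y 0 := by
        rw [PySem.Dict.getD_insert]; simp [hyx]
      have iht := ih htn
      rw [hget]
      by_cases hxt : x ∈ t <;> by_cases hq : q (d.getD y 0) <;>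
        by_cases hqv : q v <;> by_cases hqo : q (d.getD x 0) <;>
        simp [hxt, hq, hqv, hqo, Ne.symm hyx, List.mem_cons] at iht ⊢ <;>
        omega

-- one write keeps the tally list canonical
theorem bWrite_canon (ml : List (List Int)) (hml : ∀ m ∈ ml, m.Nodup)
    (d : PySem.Dict Int Int) (ch : Bool) (x v : Int)
    (h0 : d.getD x 0 = 0) (hv : v = 1 ∨ v = 2) :
    bWrite ml x v (d, ch, pvCanon ml d) = (d.insert x v, true, pvCanon ml (d.insert x v)) := by
  unfold bWrite pvCanon
  simp only [Prod.mk.injEq, true_and]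
  have hzip : ml.zip (ml.map (fun m => (cntB d m, cntU d m)))
      = ml.map (fun m => (m, (cntB d m, cntU d m))) := by
    have h := List.zip_map' (f := fun m : List Int => m)
      (g := fun m => (cntB d m, cntU d m)) (l := ml)
    simpa using h
  rw [hzip, List.map_map]
  apply List.map_congr_left
  intro m hm
  have hB := cnt_change (fun y => y == 2) d x v m (hml m hm)
  have hU := cnt_change (fun y => !(y == 2) && !(y == 1)) d x v m (hml m hm)
  simp only [Function.comp]
  by_cases hxm : x ∈ m
  · rcases hv with hv | hv <;> subst hv <;>
      simp [cntB, cntU, hxm, h0, Prod.ext_iff] at hB hU ⊢ <;> omega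
  · simp [cntB, cntU, hxm, Prod.ext_iff] at hB hU ⊢
    omega

theorem bMark_cons (ml : List (List Int)) (x : Int) (t : List Int) (v : Int)
    (st : PySem.Dict Int Int × Bool × List (Int × Int)) :
    bMark ml (x :: t) v st
      = bMark ml t v (if st.1.getD x 0 = 0 then bWrite ml x v st else st) := rfl

-- B's mark loop simulates A's, keeping the tally canonical
theorem markSim (ml : List (List Int)) (hml : ∀ m ∈ ml, m.Nodup) (v : Int) (hv : v = 1 ∨ v = 2) :
    ∀ (l : List Int) (d : PySem.Dict Int Int) (ch : Bool),
      bMark ml l v (d, ch, pvCanon ml d) = pvPack ml (ammMark l v (d, ch)) := by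
  intro l
  induction l with
  | nil => intro d ch; simp [bMark, ammMark, pvPack]
  | cons x t ih =>
    intro d ch
    rw [bMark_cons, ammMark_cons]
    show bMark ml t v
        (if d.getD x 0 = 0 then bWrite ml x v (d, ch, pvCanon ml d) else (d, ch, pvCanon ml d))
      = pvPack ml (ammMark t v (if d.getD x 0 = 0 then (d.insert x v, true) else (d, ch)))
    by_cases h0 : d.getD x 0 = 0
    · rw [if_pos h0, if_pos h0, bWrite_canon ml hml d ch x v h0 hv]
      exact ih (d.insert x v) true
    · rw [if_neg h0, if_neg h0]
      exact ih d ch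

theorem nest_if {γ : Type} (c1 c2 : Prop) [Decidable c1] [Decidable c2] (a b : γ) :
    (if c1 then (if c2 then a else b) else b) = (if c1 ∧ c2 then a else b) := by
  by_cases h1 : c1 <;> by_cases h2 : c2 <;> simp [h1, h2]

-- one pair step of the nested loops: B's state stays the packed image of A's
theorem pair_sim (ml : List (List Int)) (hml : ∀ m ∈ ml, m.Nodup)
    (d : PySem.Dict Int Int) (ch : Bool) (pg sg : Int × Int × Int × Int × List Int)
    (hpn : pg.2.2.2.2.Nodup) (hsn : sg.2.2.2.2.Nodup) (hnd : d.keys.Nodup)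
    (hc : pg.1 ≠ sg.1 → ∀ x ∈ PySem.Set.inter pg.2.2.2.2 sg.2.2.2.2, d.contains x = true)
    (hidx : pg.1 ≠ sg.1 →
      PySem.List.pyGetD (pvCanon ml d) sg.1 (0, 0) = (cntB d sg.2.2.2.2, cntU d sg.2.2.2.2)) :
    bPair ml (d, ch, pvCanon ml d) pg sg = pvPack ml (ammPair (d, ch) pg sg) := by
  by_cases hid : pg.1 = sg.1
  · unfold bPair ammPair pvPack
    simp [hid]
  · unfold bPair ammPair
    rw [if_neg hid, if_neg hid]
    set p := pg.2.2.2.2 with hp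
    set s := sg.2.2.2.2 with hs
    -- characterise B's scan
    have hscan : bScan d p s =
        (s.filter (fun x => decide (x ∈ p)),
         (s.countP (fun x => decide (x ∈ p) && (d.getD x 0 == 2)) : Int),
         (s.countP (fun x => decide (x ∈ p) && (!(d.getD x 0 == 2) && !(d.getD x 0 == 1))) : Int)) := by
      have go : ∀ (l : List Int) (acc : List Int × Int × Int),
          l.foldl
            (fun acc idx =>
              if idx ∈ p then
                let v := d.getD idx 0
                (acc.1 ++ [idx],
                 (if v = 2 then acc.2.1 + 1 else acc.2.1),
                 (if v ≠ 2 ∧ v ≠ 1 then acc.2.2 + 1 else acc.2.2))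
              else acc)
            acc
          = (acc.1 ++ l.filter (fun x => decide (x ∈ p)),
             acc.2.1 + (l.countP (fun x => decide (x ∈ p) && (d.getD x 0 == 2)) : Int),
             acc.2.2 + (l.countP (fun x => decide (x ∈ p) && (!(d.getD x 0 == 2) && !(d.getD x 0 == 1))) : Int)) := by
        intro l
        induction l with
        | nil => intro acc; simp
        | cons x t ih =>
          intro acc
          simp only [List.foldl_cons, List.countP_cons, List.filter_cons]
          by_cases hx : x ∈ p
          · by_cases h2 : d.getD x 0 = 2
            · simp [hx, h2, ih]; ring
            · by_cases h1 : d.getD x 0 = 1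
              · simp [hx, h1, ih]
              · simp [hx, h2, h1, ih]; ring
          · simp [hx, ih]
      have h := go s ([], 0, 0)
      simpa [bScan] using h
    dsimp only
    rw [hscan]
    -- A's intersection and secondary-only counts, in B's vocabulary
    rw [counts_eq d (PySem.Set.inter p s), counts_eq d (PySem.Set.diff s p)]
    have hib : ((PySem.Set.inter p s).countP (fun x => d.getD x 0 == 2) : Int)
        = (s.countP (fun x => decide (x ∈ p) && (d.getD x 0 == 2)) : Int) :=
      pvCountInter p s hpn hsn _
    have hiu : ((PySem.Set.inter p s).countP (fun x => !(d.getD x 0 == 2) && !(d.getD x 0 == 1)) : Int)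
        = (s.countP (fun x => decide (x ∈ p) && (!(d.getD x 0 == 2) && !(d.getD x 0 == 1))) : Int) :=
      pvCountInter p s hpn hsn _
    have hsob : ((PySem.Set.diff s p).countP (fun x => d.getD x 0 == 2) : Int)
        = cntB d s - (s.countP (fun x => decide (x ∈ p) && (d.getD x 0 == 2)) : Int) := by
      rw [pvCountDiff p s, cntB, countP_split p (fun x => d.getD x 0 == 2) s]; ring
    have hsou : ((PySem.Set.diff s p).countP (fun x => !(d.getD x 0 == 2) && !(d.getD x 0 == 1)) : Int)
        = cntU d s
          - (s.countP (fun x => decide (x ∈ p) && (!(d.getD x 0 == 2) && !(d.getD x 0 == 1))) : Int) := by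
      rw [pvCountDiff p s, cntU,
          countP_split p (fun x => !(d.getD x 0 == 2) && !(d.getD x 0 == 1)) s]; ring
    rw [hidx hid]
    simp only [hib, hiu, hsob, hsou]
    by_cases hiuz : (s.countP (fun x => decide (x ∈ p) && (!(d.getD x 0 == 2) && !(d.getD x 0 == 1))) : Int) = 0
    · -- both sides skip
      by_cases hie : PySem.Set.inter p s = []
      · simp [hiuz, hie, pvPack]
      · simp [hiuz, hie, pvPack]
    · -- both sides act
      have hne : PySem.Set.inter p s ≠ [] := by
        intro hnil
        apply hiuz
        rw [← hiu, hnil]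
        simp
      rw [if_neg hiuz, if_neg hne, if_neg hiuz, nest_if]
      set ib := (s.countP (fun x => decide (x ∈ p) && (d.getD x 0 == 2)) : Int) with hibd
      set iu := (s.countP (fun x => decide (x ∈ p) && (!(d.getD x 0 == 2) && !(d.getD x 0 == 1))) : Int) with hiud
      set tb := cntB d s with htbd
      set tu := cntU d s with htud
      set mn := max ib (sg.2.2.2.1 - (tb - ib) - (tu - iu)) with hmnd
      set mx := min (ib + iu) (sg.2.2.2.1 - (tb - ib)) with hmxd
      have hcontains : ∀ x ∈ PySem.Set.inter p s, d.contains x = true := hc hid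
      have hmarkB : ∀ (w : Int), w = 1 ∨ w = 2 →
          bMark ml (s.filter (fun x => decide (x ∈ p))) w (d, ch, pvCanon ml d)
            = pvPack ml (ammMark (PySem.Set.inter p s) w (d, ch)) := by
        intro w hw
        rw [markSim ml hml w hw, mark_perm p s w d ch hpn hsn hnd hcontains]
      by_cases hcond : mn > ib ∧ mn - ib = iu
      · rw [if_pos hcond, if_pos hcond, hmarkB 2 (Or.inr rfl)]
        set stA1 := ammMark (PySem.Set.inter p s) 2 (d, ch) with hstA1
        have hkeys1 : stA1.1.keys = d.keys := ammMark_keys 2 _ d ch hcontains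
        have hnd1 : stA1.1.keys.Nodup := by rw [hkeys1]; exact hnd
        have hc1 : ∀ x ∈ PySem.Set.inter p s, stA1.1.contains x = true := by
          intro x hx
          rw [PySem.Dict.contains_iff_mem_keys, hkeys1]
          exact (PySem.Dict.contains_iff_mem_keys d x).mp (hcontains x hx)
        by_cases hmx : mx = ib
        · rw [if_pos hmx, if_pos hmx]
          have hstep : bMark ml (s.filter (fun x => decide (x ∈ p))) 1 (pvPack ml stA1)
              = pvPack ml (ammMark (PySem.Set.inter p s) 1 stA1) := by
            have hpk : pvPack ml stA1 = (stA1.1, stA1.2, pvCanon ml stA1.1) := rfl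
            rw [hpk, markSim ml hml 1 (Or.inl rfl),
                mark_perm p s 1 stA1.1 stA1.2 hpn hsn hnd1 hc1]
          rw [hstep]
        · rw [if_neg hmx, if_neg hmx]
      · rw [if_neg hcond, if_neg hcond]
        by_cases hmx : mx = ib
        · rw [if_pos hmx, if_pos hmx, hmarkB 1 (Or.inl rfl)]
        · rw [if_neg hmx, if_neg hmx]; rfl

-- the simulation relation between A's and B's fold states
def pvR (cells : List (Int × Int)) (groups : List (Int × Int × Int × List Int))
    (stA : PySem.Dict Int Int × Bool) (stB : PySem.Dict Int Int × Bool × List (Int × Int)) : Prop :=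
  stB = pvPack (groups.map (fun g => g.2.2.2)) stA ∧ stA.1.keys = cells.map Prod.fst

theorem step_sim (cells : List (Int × Int)) (groups : List (Int × Int × Int × List Int))
    (hpre : Pre_apply_min_max cells groups)
    (pg : Int × Int × Int × Int × List Int) (hpg : pg ∈ PySem.List.enumerate groups)
    (sA : PySem.Dict Int Int × Bool) (sB : PySem.Dict Int Int × Bool × List (Int × Int))
    (sg : Int × Int × Int × Int × List Int) (hsg : sg ∈ PySem.List.enumerate groups)
    (hR : pvR cells groups sA sB) :
    pvR cells groups (ammPair sA pg sg) (bPair (groups.map (fun g => g.2.2.2)) sB pg sg) := by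
  obtain ⟨hkeysnd, hgnodup, hpairs⟩ := hpre
  obtain ⟨hpack, hkeys⟩ := hR
  obtain ⟨d, ch⟩ := sA
  have hndd : d.keys.Nodup := by
    show (d, ch).1.keys.Nodup
    rw [hkeys]
    exact hkeysnd
  have hcont : pg.1 ≠ sg.1 →
      ∀ x ∈ PySem.Set.inter pg.2.2.2.2 sg.2.2.2.2, (d, ch).1.contains x = true := by
    intro hid x hx
    rw [PySem.Dict.contains_iff_mem_keys, hkeys]
    exact (hpairs pg hpg sg hsg hid).1 x hx
  have hidx : PySem.List.pyGetD (pvCanon (groups.map (fun g => g.2.2.2)) d) sg.1 (0, 0)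
      = (cntB d sg.2.2.2.2, cntU d sg.2.2.2.2) := by
    obtain ⟨k, hk, rfl⟩ := (PySem.List.mem_enumerate_iff groups 0 sg).mp hsg
    simp only [zero_add]
    have hlen : k < (pvCanon (groups.map (fun g => g.2.2.2)) d).length := by
      simp [pvCanon, hk]
    rw [PySem.List.pyGetD_natCast, List.getD_eq_getElem _ _ hlen]
    simp [pvCanon]
  have hml : ∀ m ∈ groups.map (fun g => g.2.2.2), m.Nodup := by
    intro m hm
    obtain ⟨g, hg, rfl⟩ := List.mem_map.mp hm
    exact hgnodup g hg
  constructor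
  · rw [hpack]
    show bPair (groups.map (fun g => g.2.2.2))
        (d, ch, pvCanon (groups.map (fun g => g.2.2.2)) d) pg sg
      = pvPack (groups.map (fun g => g.2.2.2)) (ammPair (d, ch) pg sg)
    have h1 := pair_sim (groups.map (fun g => g.2.2.2)) hml d ch pg sg
      (hgnodup pg.2 (enum_snd_mem hpg)) (hgnodup sg.2 (enum_snd_mem hsg))
      hndd hcont (fun _ => hidx)
    exact h1
  · rw [ammPair_keys (d, ch) pg sg hcont]
    exact hkeys

set_option maxHeartbeats 1000000 in
theorem main_spec (cells : List (Int × Int)) (groups : List (Int × Int × Int × List Int))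
    (hpre : Pre_apply_min_max cells groups) :
    apply_min_max cells groups = apply_min_max_alt cells groups := by
  unfold apply_min_max apply_min_max_alt
  have hfold := pvFoldlSim
    (R := pvR cells groups)
    (f := fun st pg => (PySem.List.enumerate groups).foldl (fun st sg => ammPair st pg sg) st)
    (g := fun st pg => (PySem.List.enumerate groups).foldl
      (fun st sg => bPair (groups.map (fun g => g.2.2.2)) st pg sg) st)
    (PySem.List.enumerate groups)
    (PySem.Dict.mk cells, false)
    (PySem.Dict.mk cells, false,
      (groups.map (fun g => g.2.2.2)).map (fun m => bTally (PySem.Dict.mk cells) m))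
    (by
      refine ⟨?_, rfl⟩
      unfold pvPack
      rw [pvCanon_init])
    (fun stA stB pg hpg hR => pvFoldlSim
      (R := pvR cells groups)
      (f := fun st sg => ammPair st pg sg)
      (g := fun st sg => bPair (groups.map (fun g => g.2.2.2)) st pg sg)
      (PySem.List.enumerate groups) stA stB hR
      (fun sA sB sg hsg hR' => step_sim cells groups hpre pg hpg sA sB sg hsg hR'))
  obtain ⟨hpack, _⟩ := hfold
  exact (congrArg (fun st : PySem.Dict Int Int × Bool × List (Int × Int) => st.2.1) hpack).symm

-- ===== VERDICT (by name: the statement is the Claim_ definition above) =====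
theorem apply_min_max_spec : Claim_equal_apply_min_max := by
  unfold Claim_equal_apply_min_max
  intro cells groups _hdom hpre
  unfold Spec_apply_min_max
  exact main_spec cells groups hpre
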